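-- pv_equiv track=rewrite | github.com/SStarver/PythonTutorial | ka_compiler/op_schedule.py | _get_bounded_outp
-- ===== SOURCE A (Python) =====
-- def _get_bounded_outp(outp_mb, bound_size):
--     height = outp_mb[2]
--     weight = outp_mb[3]
--     divisior_h = []
--     divisior_w = []
--     res_pair = [
--         1,
--         1,
--         1,
--     ]
--
--     for h in range(1, height + 1):
--         if height % h == 0:
--             divisior_h.append(h)
--     for w in range(1, weight + 1):
--         if weight % w == 0:
--             divisior_w.append(w)
--
--     for h in divisior_h:
--         for w in divisior_w:
--             if (h * w) == bound_size:
--                 outp_mb[2] = h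
--                 outp_mb[3] = w
--                 return outp_mb
--             elif h * w < bound_size and h * w > res_pair[2]:
--                 res_pair[0] = h
--                 res_pair[1] = w
--                 res_pair[2] = h * w
--     outp_mb[2] = res_pair[0]
--     outp_mb[3] = res_pair[1]
--     return outp_mb
-- ===== SOURCE B (Python) =====
-- # B: divisors enumerated by trial division up to the square root (instead of
-- # scanning every candidate up to n), then the divisor-pair search split into an
-- # exact-match pass (divisibility + set lookup) and a best-below pass using
-- # bisect on the sorted divisor list, instead of A's nested early-return loop.
-- # Mutates outp_mb[2], outp_mb[3] in place and returns it, exactly like A.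
-- from bisect import bisect_right
--
--
-- def _divisors(n):
--     small, large = [], []
--     d = 1
--     while d * d <= n:
--         if n % d == 0:
--             small.append(d)
--             if d != n // d:
--                 large.append(n // d)
--         d += 1
--     large.reverse()
--     return small + large
--
--
-- def _get_bounded_outp(outp_mb, bound_size):
--     div_h = _divisors(outp_mb[2])
--     div_w = _divisors(outp_mb[3])
--     w_set = set(div_w)
--     for h in div_h:
--         if bound_size % h == 0 and bound_size // h in w_set:
--             outp_mb[2] = h
--             outp_mb[3] = bound_size // h
--             return outp_mb
--     best_h, best_w, best_p = 1, 1, 1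
--     for h in div_h:
--         i = bisect_right(div_w, (bound_size - 1) // h)
--         if i and h * div_w[i - 1] > best_p:
--             best_h, best_w, best_p = h, div_w[i - 1], h * div_w[i - 1]
--     outp_mb[2] = best_h
--     outp_mb[3] = best_w
--     return outp_mb
-- ===== Notes on version B (the rewrite author's own statement) =====
-- stated objective: alternative
-- what changed: B enumerates the divisors of height/weight by trial division up to the square root (instead of scanning every integer up to n), then replaces the nested early-return pair loop by an exact-match pass (divisibility check + set membership) followed by a best-below pass that bisects the sorted divisor list for the largest admissible cofactor.
import Mathlib
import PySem

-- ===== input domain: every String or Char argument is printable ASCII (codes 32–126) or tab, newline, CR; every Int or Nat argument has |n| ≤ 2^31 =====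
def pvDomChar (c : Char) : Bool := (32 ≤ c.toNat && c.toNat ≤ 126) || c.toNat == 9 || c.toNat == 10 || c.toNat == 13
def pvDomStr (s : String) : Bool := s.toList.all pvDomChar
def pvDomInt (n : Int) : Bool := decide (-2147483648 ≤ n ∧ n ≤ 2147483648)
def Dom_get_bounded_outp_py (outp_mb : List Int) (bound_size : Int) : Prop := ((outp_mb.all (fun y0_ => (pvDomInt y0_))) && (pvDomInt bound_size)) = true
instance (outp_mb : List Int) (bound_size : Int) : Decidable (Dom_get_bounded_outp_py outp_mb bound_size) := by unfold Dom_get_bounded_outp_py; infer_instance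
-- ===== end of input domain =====

-- B enumerates divisors by trial division up to the square root instead of scanning
-- every candidate up to the number, and replaces the nested early-return pair loop by
-- an exact-match pass (divisibility + membership) and a best-below pass using bisection.
-- Both A and B mutate outp_mb[2] and outp_mb[3] in place in Python; the equivalence
-- proved here is about the returned list (which is that mutated list in both).

-- ===== PORT A =====
-- the inner `for w in divisior_w` loop: early return as .inl, fall-through state as .inr
def innerA (h : Int) (ws : List Int) (bound : Int) (res : Int × Int × Int) :
    (Int × Int) ⊕ (Int × Int × Int) :=
  match ws with
  | [] => .inr res
  | w :: rest =>
    if h * w == bound then .inl (h, w)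
    else if h * w < bound ∧ h * w > res.2.2 then innerA h rest bound (h, w, h * w)
    else innerA h rest bound res

-- the outer `for h in divisior_h` loop
def outerA (hs ws : List Int) (bound : Int) (res : Int × Int × Int) :
    (Int × Int) ⊕ (Int × Int × Int) :=
  match hs with
  | [] => .inr res
  | h :: rest =>
    match innerA h ws bound res with
    | .inl p => .inl p
    | .inr res' => outerA rest ws bound res'

def get_bounded_outp_py (outp_mb : List Int) (bound_size : Int) : List Int :=
  let height := PySem.List.pyGetD outp_mb 2 0
  let weight := PySem.List.pyGetD outp_mb 3 0
  let divisior_h := (PySem.List.pyRange 1 (height + 1)).foldl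
      (fun acc h => if PySem.Int.mod height h == 0 then acc ++ [h] else acc) []
  let divisior_w := (PySem.List.pyRange 1 (weight + 1)).foldl
      (fun acc w => if PySem.Int.mod weight w == 0 then acc ++ [w] else acc) []
  match outerA divisior_h divisior_w bound_size (1, 1, 1) with
  | .inl (h, w) => (outp_mb.set 2 h).set 3 w
  | .inr r => (outp_mb.set 2 r.1).set 3 r.2.1

-- ===== PORT B =====
-- `while d * d <= n` trial-division loop of Source B's _divisors
def divLoop (n d : Int) (small large : List Int) : List Int × List Int :=
  if hd : d * d ≤ n then
    if PySem.Int.mod n d == 0 then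
      divLoop n (d + 1) (small ++ [d])
        (if d ≠ PySem.Int.floordiv n d then large ++ [PySem.Int.floordiv n d] else large)
    else divLoop n (d + 1) small large
  else (small, large)
termination_by (n + 1 - d).toNat
decreasing_by
  all_goals
    have hdd : d ≤ d * d := by nlinarith [mul_self_nonneg d, sq_nonneg (d - 1)]
    omega

def fastDivisors (n : Int) : List Int :=
  let p := divLoop n 1 [] []
  p.1 ++ p.2.reverse

def get_bounded_outp_py_alt (outp_mb : List Int) (bound_size : Int) : List Int :=
  let div_h := fastDivisors (PySem.List.pyGetD outp_mb 2 0)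
  let div_w := fastDivisors (PySem.List.pyGetD outp_mb 3 0)
  match div_h.find? (fun h =>
      PySem.Int.mod bound_size h == 0 &&
      div_w.contains (PySem.Int.floordiv bound_size h)) with
  | some h => (outp_mb.set 2 h).set 3 (PySem.Int.floordiv bound_size h)
  | none =>
    let best := div_h.foldl (fun (b : Int × Int × Int) h =>
      let i := PySem.List.bisectRight div_w (PySem.Int.floordiv (bound_size - 1) h)
      if i ≠ 0 ∧ h * div_w.getD (i - 1) 0 > b.2.2 then
        (h, div_w.getD (i - 1) 0, h * div_w.getD (i - 1) 0)
      else b) (1, 1, 1)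
    (outp_mb.set 2 best.1).set 3 best.2.1

-- ===== PRECONDITION & SPEC =====
-- Python A indexes outp_mb[2] and outp_mb[3] and raises IndexError on shorter lists;
-- nothing else is excluded.
def Pre_get_bounded_outp_py (outp_mb : List Int) (bound_size : Int) : Prop :=
  4 ≤ outp_mb.length
instance (outp_mb : List Int) (bound_size : Int) : Decidable (Pre_get_bounded_outp_py outp_mb bound_size) := by unfold Pre_get_bounded_outp_py; infer_instance

def pvWitness_get_bounded_outp_py : List Int × Int := ([1, 1, 6, 4], 8)

def Spec_get_bounded_outp_py (outp_mb : List Int) (bound_size : Int) (out : List Int) : Prop := out = get_bounded_outp_py_alt outp_mb bound_size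
instance (outp_mb : List Int) (bound_size : Int) (out : List Int) : Decidable (Spec_get_bounded_outp_py outp_mb bound_size out) := by unfold Spec_get_bounded_outp_py; infer_instance

-- ===== CLAIM (what is proved, stated in full; the proofs are below) =====
def Claim_equal_get_bounded_outp_py : Prop := ∀ (outp_mb : List Int) (bound_size : Int), Dom_get_bounded_outp_py outp_mb bound_size → Pre_get_bounded_outp_py outp_mb bound_size → Spec_get_bounded_outp_py outp_mb bound_size (get_bounded_outp_py outp_mb bound_size)

-- ===== LEMMAS AND PROOFS =====

-- A's ascending divisor list (what its two range loops build)
def LA (n : Int) : List Int :=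
  (PySem.List.pyRange 1 (n + 1)).filter (fun d => PySem.Int.mod n d == 0)

lemma mem_LA {n x : Int} : x ∈ LA n ↔ 1 ≤ x ∧ x ≤ n ∧ x ∣ n := by
  simp only [LA, List.mem_filter, PySem.List.mem_pyRange_one, beq_iff_eq,
    PySem.Int.mod_eq_zero_iff_dvd]
  constructor
  · rintro ⟨⟨h1, h2⟩, h3⟩; exact ⟨h1, by omega, h3⟩
  · rintro ⟨h1, h2, h3⟩; exact ⟨⟨h1, by omega⟩, h3⟩

lemma pairwise_LA (n : Int) : (LA n).Pairwise (· < ·) :=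
  (PySem.List.pairwise_lt_pyRange_one _ _).filter _

lemma foldl_eq_LA (n : Int) :
    (PySem.List.pyRange 1 (n + 1)).foldl
      (fun acc d => if PySem.Int.mod n d == 0 then acc ++ [d] else acc) [] = LA n := by
  simpa [LA] using
    PySem.List.foldl_append_if (fun d => PySem.Int.mod n d == 0) id
      (PySem.List.pyRange 1 (n + 1)) []

-- filter over a strictly sorted list: split off the candidate d at the front
lemma filter_ge_cons {l : List Int} (hl : l.Pairwise (· < ·)) (d : Int) (P : Int → Bool) :
    l.filter (fun e => decide (d ≤ e) && P e)
      = (if d ∈ l ∧ P d = true then [d] else []) ++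
        l.filter (fun e => decide (d + 1 ≤ e) && P e) := by
  induction l with
  | nil => simp
  | cons x t ih =>
    have ht : t.Pairwise (· < ·) := hl.of_cons
    have hxt : ∀ y ∈ t, x < y := fun y hy => List.rel_of_pairwise_cons hl hy
    rcases lt_trichotomy x d with hcmp | hcmp | hcmp
    · have h1 : ¬ ((decide (d ≤ x) && P x) = true) := by
        simp only [Bool.and_eq_true, decide_eq_true_eq]; rintro ⟨hc, -⟩; omega
      have h2 : ¬ ((decide (d + 1 ≤ x) && P x) = true) := by
        simp only [Bool.and_eq_true, decide_eq_true_eq]; rintro ⟨hc, -⟩; omega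
      have hmem : d ∈ x :: t ↔ d ∈ t := by
        constructor
        · intro hm
          rcases List.mem_cons.mp hm with rfl | hm'
          · omega
          · exact hm'
        · exact fun hm => List.mem_cons_of_mem _ hm
      simp only [List.filter_cons]
      rw [if_neg h1, if_neg h2, ih ht]
      congr 1
      exact if_congr (and_congr_left' hmem).symm rfl rfl
    · subst hcmp
      have hcong : t.filter (fun e => decide (x ≤ e) && P e)
          = t.filter (fun e => decide (x + 1 ≤ e) && P e) := by
        apply List.filter_congr
        intro e he
        have hlt : x < e := hxt e he
        have h1 : decide (x ≤ e) = true := by simp only [decide_eq_true_eq]; omega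
        have h2 : decide (x + 1 ≤ e) = true := by simp only [decide_eq_true_eq]; omega
        rw [h1, h2]
      have h2 : ¬ ((decide (x + 1 ≤ x) && P x) = true) := by
        simp only [Bool.and_eq_true, decide_eq_true_eq]; rintro ⟨hc, -⟩; omega
      simp only [List.filter_cons]
      rw [if_neg h2]
      cases hP : P x with
      | false => simp [hcong]
      | true => simp [hcong]
    · have hdn : d ∉ x :: t := by
        intro hm
        rcases List.mem_cons.mp hm with rfl | hm'
        · omega
        · have := hxt d hm'; omega
      rw [if_neg (fun hc => hdn hc.1)]
      simp only [List.nil_append]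
      apply List.filter_congr
      intro e he
      have hde : d < e := by
        rcases List.mem_cons.mp he with rfl | hm'
        · omega
        · have := hxt e hm'; omega
      have h1 : decide (d ≤ e) = true := by simp only [decide_eq_true_eq]; omega
      have h2 : decide (d + 1 ≤ e) = true := by simp only [decide_eq_true_eq]; omega
      rw [h1, h2]

lemma divLoop_spec (n : Int) (hn : 1 ≤ n) :
    ∀ (d : Int) (small large : List Int), 1 ≤ d →
    divLoop n d small large =
      (small ++ (LA n).filter (fun e => decide (d ≤ e) && decide (e * e ≤ n)),
       large ++ ((LA n).filter (fun e => decide (d ≤ e) && decide (e * e < n))).map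
         (fun e => n / e)) := by
  intro d small large
  induction d, small, large using divLoop.induct n with
  | case1 d small large hdd hmod ih =>
    intro hd1
    have hdvd : d ∣ n := by
      have := (beq_iff_eq).mp hmod
      exact (PySem.Int.mod_eq_zero_iff_dvd n d).mp this
    have hfd : PySem.Int.floordiv n d = n / d := PySem.Int.floordiv_eq_ediv_of_pos (by omega)
    have hmul : d * (n / d) = n := Int.mul_ediv_cancel' hdvd
    have hdn : d ≤ n := by nlinarith
    have hdmem : d ∈ LA n := mem_LA.mpr ⟨hd1, hdn, hdvd⟩
    have hq1 : 1 ≤ n / d := by nlinarith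
    have hne_iff : d ≠ PySem.Int.floordiv n d ↔ d * d < n := by
      rw [hfd]
      constructor
      · intro hne
        rcases lt_or_eq_of_le hdd with h | h
        · exact h
        · exact absurd (by nlinarith : d = n / d) hne
      · intro hlt heq
        nlinarith
    have hsmall : (LA n).filter (fun e => decide (d ≤ e) && decide (e * e ≤ n))
        = d :: (LA n).filter (fun e => decide (d + 1 ≤ e) && decide (e * e ≤ n)) := by
      rw [filter_ge_cons (pairwise_LA n) d (fun e => decide (e * e ≤ n)),
        if_pos ⟨hdmem, by simpa using hdd⟩]
      rfl
    simp only [dite_eq_ite] at ih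
    rw [divLoop]
    rw [dif_pos hdd, if_pos hmod, ih (by omega), hsmall]
    by_cases hlt : d * d < n
    · have hlg : (LA n).filter (fun e => decide (d ≤ e) && decide (e * e < n))
          = d :: (LA n).filter (fun e => decide (d + 1 ≤ e) && decide (e * e < n)) := by
        rw [filter_ge_cons (pairwise_LA n) d (fun e => decide (e * e < n)),
          if_pos ⟨hdmem, by simpa using hlt⟩]
        rfl
      rw [if_pos (hne_iff.mpr hlt), hlg]
      simp [hfd]
    · have hlg : (LA n).filter (fun e => decide (d ≤ e) && decide (e * e < n))
          = (LA n).filter (fun e => decide (d + 1 ≤ e) && decide (e * e < n)) := by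
        rw [filter_ge_cons (pairwise_LA n) d (fun e => decide (e * e < n)),
          if_neg (by simp [hlt])]
        rfl
      rw [if_neg (fun hc => hlt (hne_iff.mp hc)), hlg]
      simp
  | case2 d small large hdd hmod ih =>
    intro hd1
    have hnd : ¬ d ∣ n := by
      intro hdvd
      exact hmod (by simpa [beq_iff_eq] using (PySem.Int.mod_eq_zero_iff_dvd n d).mpr hdvd)
    have hdnm : d ∉ LA n := fun hm => hnd (mem_LA.mp hm).2.2
    have hs : (LA n).filter (fun e => decide (d ≤ e) && decide (e * e ≤ n))
        = (LA n).filter (fun e => decide (d + 1 ≤ e) && decide (e * e ≤ n)) := by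
      rw [filter_ge_cons (pairwise_LA n) d (fun e => decide (e * e ≤ n)),
        if_neg (fun hc => hdnm hc.1)]
      rfl
    have hl : (LA n).filter (fun e => decide (d ≤ e) && decide (e * e < n))
        = (LA n).filter (fun e => decide (d + 1 ≤ e) && decide (e * e < n)) := by
      rw [filter_ge_cons (pairwise_LA n) d (fun e => decide (e * e < n)),
        if_neg (fun hc => hdnm hc.1)]
      rfl
    rw [divLoop, dif_pos hdd, if_neg hmod, ih (by omega), hs, hl]
  | case3 d small large hdd =>
    intro hd1
    have hs : (LA n).filter (fun e => decide (d ≤ e) && decide (e * e ≤ n)) = [] := by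
      rw [List.filter_eq_nil_iff]
      intro e he
      have h1 : 1 ≤ e := (mem_LA.mp he).1
      simp only [Bool.and_eq_true, decide_eq_true_eq, not_and]
      intro hde
      nlinarith
    have hl : (LA n).filter (fun e => decide (d ≤ e) && decide (e * e < n)) = [] := by
      rw [List.filter_eq_nil_iff]
      intro e he
      have h1 : 1 ≤ e := (mem_LA.mp he).1
      simp only [Bool.and_eq_true, decide_eq_true_eq, not_and]
      intro hde
      nlinarith
    rw [divLoop, dif_neg hdd, hs, hl]
    simp

-- a divisor e of n paired with its codivisor n / e
lemma co_mem {n e : Int} (hn : 1 ≤ n) (he : e ∈ LA n) :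
    n / e ∈ LA n ∧ e * (n / e) = n ∧ 1 ≤ n / e := by
  obtain ⟨h1, h2, hdvd⟩ := mem_LA.mp he
  have hmul : e * (n / e) = n := Int.mul_ediv_cancel' hdvd
  have hq1 : 1 ≤ n / e := by nlinarith
  have hqdvd : n / e ∣ n := ⟨e, by rw [mul_comm] at hmul; omega⟩
  exact ⟨mem_LA.mpr ⟨hq1, Int.le_of_dvd (by omega) hqdvd, hqdvd⟩, hmul, hq1⟩

lemma fastDivisors_eq (n : Int) : fastDivisors n = LA n := by
  by_cases hn : 1 ≤ n
  · unfold fastDivisors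
    rw [divLoop_spec n hn 1 [] [] (le_refl 1)]
    have hS : (LA n).filter (fun e => decide (1 ≤ e) && decide (e * e ≤ n))
        = (LA n).filter (fun e => decide (e * e ≤ n)) := by
      apply List.filter_congr
      intro e he
      have h1 := (mem_LA.mp he).1
      simp [h1]
    have hL : (LA n).filter (fun e => decide (1 ≤ e) && decide (e * e < n))
        = (LA n).filter (fun e => decide (e * e < n)) := by
      apply List.filter_congr
      intro e he
      have h1 := (mem_LA.mp he).1
      simp [h1]
    simp only [hS, hL, List.nil_append]
    set S := (LA n).filter (fun e => decide (e * e ≤ n)) with hSdef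
    set Lm := ((LA n).filter (fun e => decide (e * e < n))).map (fun e => n / e) with hLdef
    have hmemS : ∀ {x : Int}, x ∈ S → x ∈ LA n ∧ x * x ≤ n := by
      intro x hx
      have := List.mem_filter.mp hx
      exact ⟨this.1, by simpa using this.2⟩
    have hmemL : ∀ {x : Int}, x ∈ Lm.reverse → x ∈ LA n ∧ n < x * x := by
      intro x hx
      rw [List.mem_reverse, hLdef, List.mem_map] at hx
      obtain ⟨e, hef, hex⟩ := hx
      have hmf := List.mem_filter.mp hef
      have helt : e * e < n := by simpa using hmf.2
      obtain ⟨hqm, hmul, hq1⟩ := co_mem hn hmf.1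
      obtain ⟨he1, -, -⟩ := mem_LA.mp hmf.1
      subst hex
      refine ⟨hqm, ?_⟩
      nlinarith
    have hp1 : S.Pairwise (· < ·) := (pairwise_LA n).filter _
    have hp2 : Lm.reverse.Pairwise (· < ·) := by
      rw [List.pairwise_reverse, hLdef, List.pairwise_map]
      apply ((pairwise_LA n).filter (fun e => decide (e * e < n))).imp_of_mem
      intro a b ha hb hab
      have hma := List.mem_filter.mp ha
      have hmb := List.mem_filter.mp hb
      obtain ⟨-, hmula, hqa⟩ := co_mem hn hma.1
      obtain ⟨-, hmulb, hqb⟩ := co_mem hn hmb.1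
      obtain ⟨ha1, -, -⟩ := mem_LA.mp hma.1
      obtain ⟨hb1, -, -⟩ := mem_LA.mp hmb.1
      by_contra hc
      push_neg at hc
      nlinarith
    have hpair : (S ++ Lm.reverse).Pairwise (· < ·) := by
      rw [List.pairwise_append]
      refine ⟨hp1, hp2, ?_⟩
      intro a ha b hb
      obtain ⟨hma, haa⟩ := hmemS ha
      obtain ⟨hmb, hbb⟩ := hmemL hb
      obtain ⟨ha1, -, -⟩ := mem_LA.mp hma
      obtain ⟨hb1, -, -⟩ := mem_LA.mp hmb
      nlinarith
    have hmem : ∀ (x : Int), x ∈ S ++ Lm.reverse ↔ x ∈ LA n := by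
      intro x
      rw [List.mem_append]
      constructor
      · rintro (hx | hx)
        · exact (hmemS hx).1
        · exact (hmemL hx).1
      · intro hx
        by_cases hxx : x * x ≤ n
        · exact Or.inl (List.mem_filter.mpr ⟨hx, by simpa using hxx⟩)
        · right
          obtain ⟨hqm, hmul, hq1⟩ := co_mem hn hx
          obtain ⟨hx1, -, hxdvd⟩ := mem_LA.mp hx
          have hee : (n / x) * (n / x) < n := by nlinarith
          have hnx : n / (n / x) = x := by
            have h2 : (n / x) * x = n := by rw [mul_comm] at hmul; exact hmul
            nth_rewrite 1 [← h2]
            exact Int.mul_ediv_cancel_left x (ne_of_gt (by linarith))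
          rw [List.mem_reverse, hLdef, List.mem_map]
          exact ⟨n / x, List.mem_filter.mpr ⟨hqm, by simpa using hee⟩, hnx⟩
    have hnd1 : (S ++ Lm.reverse).Nodup := hpair.imp (fun h => ne_of_lt h)
    have hnd2 : (LA n).Nodup := (pairwise_LA n).imp (fun h => ne_of_lt h)
    have hperm : (S ++ Lm.reverse).Perm (LA n) :=
      (List.perm_ext_iff_of_nodup hnd1 hnd2).mpr hmem
    exact hperm.eq_of_pairwise
      (fun a b _ _ h1 h2 => absurd h1 (not_lt.mpr h2.le)) hpair (pairwise_LA n)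
  · have hla : LA n = [] := by
      unfold LA
      rw [PySem.List.pyRange_one_eq_nil (by omega)]
      rfl
    unfold fastDivisors
    rw [divLoop, dif_neg (by nlinarith)]
    simp [hla]

-- best "h*w < bound" pair contributed by one h against the ascending list ws
def bestOf (ws : List Int) (bound h : Int) (res : Int × Int × Int) : Int × Int × Int :=
  match (ws.filter (fun w => decide (h * w < bound))).getLast? with
  | some w => if h * w > res.2.2 then (h, w, h * w) else res
  | none => res

lemma innerA_no_match {h bound : Int} (hh : 1 ≤ h) :
    ∀ {ws : List Int}, ws.Pairwise (· < ·) → (∀ w ∈ ws, h * w ≠ bound) →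
    ∀ res, innerA h ws bound res = .inr (bestOf ws bound h res) := by
  intro ws
  induction ws with
  | nil => intro _ _ res; simp [innerA, bestOf]
  | cons w rest ih =>
    intro hp hno res
    have hrp := hp.of_cons
    have hwlt : ∀ y ∈ rest, w < y := fun y hy => List.rel_of_pairwise_cons hp hy
    have hno' : ∀ u ∈ rest, h * u ≠ bound := fun u hu => hno u (List.mem_cons_of_mem _ hu)
    have hne : ¬ (h * w == bound) = true := by simpa using hno w List.mem_cons_self
    simp only [innerA, if_neg hne]
    by_cases hlt : h * w < bound
    · have hfc : (w :: rest).filter (fun u => decide (h * u < bound))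
          = w :: rest.filter (fun u => decide (h * u < bound)) :=
        List.filter_cons_of_pos (by simpa using hlt)
      by_cases hgt : h * w > res.2.2
      · rw [if_pos ⟨hlt, hgt⟩, ih hrp hno' (h, w, h * w)]
        congr 1
        unfold bestOf
        rw [hfc, List.getLast?_cons]
        cases hlast : (rest.filter (fun u => decide (h * u < bound))).getLast? with
        | none => simp [hgt]
        | some w' =>
          have hw'mem : w' ∈ rest :=
            (List.mem_filter.mp (List.mem_of_getLast? hlast)).1
          have hww' : w < w' := hwlt w' hw'mem
          have hml : h * w < h * w' := by nlinarith
          simp only [Option.getD_some]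
          rw [if_pos (by omega), if_pos (by omega)]
      · rw [if_neg (fun hc => hgt hc.2), ih hrp hno' res]
        congr 1
        unfold bestOf
        rw [hfc, List.getLast?_cons]
        cases hlast : (rest.filter (fun u => decide (h * u < bound))).getLast? with
        | none =>
          simp only [Option.getD_none]
          rw [if_neg (by omega)]
        | some w' => simp
    · have hfn : ∀ u ∈ w :: rest, ¬ ((fun u => decide (h * u < bound)) u = true) := by
        intro u hu
        rcases List.mem_cons.mp hu with rfl | hu'
        · simpa using hlt
        · have := hwlt u hu'
          simp only [decide_eq_true_eq]
          nlinarith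
      have hfw : (w :: rest).filter (fun u => decide (h * u < bound)) = [] :=
        List.filter_eq_nil_iff.mpr hfn
      have hfr : rest.filter (fun u => decide (h * u < bound)) = [] :=
        List.filter_eq_nil_iff.mpr (fun u hu => hfn u (List.mem_cons_of_mem _ hu))
      rw [if_neg (fun hc => hlt hc.1), ih hrp hno' res]
      congr 1
      unfold bestOf
      rw [hfw, hfr]

lemma innerA_match {h bound : Int} (hh : 1 ≤ h) :
    ∀ {ws : List Int}, (∃ w ∈ ws, h * w = bound) →
    ∀ res, innerA h ws bound res = .inl (h, bound / h) := by
  intro ws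
  induction ws with
  | nil => rintro ⟨w, hw, -⟩; cases hw
  | cons w rest ih =>
    rintro ⟨w', hw', he⟩ res
    by_cases hw : h * w = bound
    · have hwq : w = bound / h := by
        rw [← hw]; exact (Int.mul_ediv_cancel_left w (by omega)).symm
      simp only [innerA, beq_iff_eq]
      rw [if_pos hw, hwq]
    · have hex' : ∃ u ∈ rest, h * u = bound := by
        rcases List.mem_cons.mp hw' with rfl | hm
        · exact absurd he hw
        · exact ⟨w', hm, he⟩
      simp only [innerA, beq_iff_eq, if_neg hw]
      split_ifs <;> exact ih hex' _

lemma pred_iff {h bound : Int} (hh : 1 ≤ h) (ws : List Int) :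
    (PySem.Int.mod bound h == 0 && ws.contains (PySem.Int.floordiv bound h)) = true
      ↔ ∃ w ∈ ws, h * w = bound := by
  have hpos : (0 : Int) < h := by omega
  have hfd := PySem.Int.floordiv_eq_ediv_of_pos (a := bound) hpos
  simp only [Bool.and_eq_true, beq_iff_eq, PySem.Int.mod_eq_zero_iff_dvd,
    List.contains_iff_mem, hfd]
  constructor
  · rintro ⟨hdvd, hmem⟩
    exact ⟨bound / h, hmem, Int.mul_ediv_cancel' hdvd⟩
  · rintro ⟨w, hw, heq⟩
    have hdvd : h ∣ bound := ⟨w, heq.symm⟩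
    have hq : bound / h = w := by
      rw [← heq]; exact Int.mul_ediv_cancel_left w (by omega)
    exact ⟨hdvd, hq ▸ hw⟩

lemma outerA_spec {ws : List Int} {bound : Int} (hws : ws.Pairwise (· < ·)) :
    ∀ {hs : List Int}, (∀ h ∈ hs, 1 ≤ h) → ∀ res,
    outerA hs ws bound res =
      match hs.find? (fun h =>
          PySem.Int.mod bound h == 0 && ws.contains (PySem.Int.floordiv bound h)) with
      | some h => .inl (h, PySem.Int.floordiv bound h)
      | none => .inr (hs.foldl (fun r h => bestOf ws bound h r) res) := by
  intro hs
  induction hs with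
  | nil => intro _ res; simp [outerA]
  | cons h rest ih =>
    intro h1 res
    have hh : 1 ≤ h := h1 h List.mem_cons_self
    have h1' : ∀ u ∈ rest, 1 ≤ u := fun u hu => h1 u (List.mem_cons_of_mem _ hu)
    by_cases hp : (PySem.Int.mod bound h == 0 &&
        ws.contains (PySem.Int.floordiv bound h)) = true
    · have hex := (pred_iff hh ws).mp hp
      have hfd : PySem.Int.floordiv bound h = bound / h :=
        PySem.Int.floordiv_eq_ediv_of_pos (by omega)
      rw [List.find?_cons_of_pos
        (p := fun u => PySem.Int.mod bound u == 0 && ws.contains (PySem.Int.floordiv bound u)) hp]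
      simp only [outerA, innerA_match hh hex res, hfd]
    · have hnex : ∀ w ∈ ws, h * w ≠ bound := by
        intro w hw hc
        exact hp ((pred_iff hh ws).mpr ⟨w, hw, hc⟩)
      rw [List.find?_cons_of_neg
        (p := fun u => PySem.Int.mod bound u == 0 && ws.contains (PySem.Int.floordiv bound u)) hp]
      simp only [outerA, innerA_no_match hh hws hnex res]
      rw [ih h1' (bestOf ws bound h res)]
      rfl

lemma filter_eq_take {q : Int} :
    ∀ (l : List Int) (i : Nat), i ≤ l.length →
    (∀ (j : Nat) (hj : j < l.length), j < i → l[j] ≤ q) →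
    (∀ (j : Nat) (hj : j < l.length), i ≤ j → q < l[j]) →
    l.filter (fun w => decide (w ≤ q)) = l.take i := by
  intro l
  induction l with
  | nil => intro i _ _ _; simp
  | cons x t ih =>
    intro i hle h1 h2
    cases i with
    | zero =>
      rw [List.take_zero]
      apply List.filter_eq_nil_iff.mpr
      intro u hu
      obtain ⟨j, hj, hju⟩ := List.mem_iff_getElem.mp hu
      have := h2 j hj (Nat.zero_le j)
      simp only [decide_eq_true_eq]
      omega
    | succ k =>
      have hx : x ≤ q := by
        have := h1 0 (by simp) (Nat.succ_pos k)
        simpa using this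
      rw [List.take_succ_cons, List.filter_cons_of_pos (by simpa using hx)]
      congr 1
      apply ih k (by simpa using hle)
      · intro j hj hjk
        have := h1 (j + 1) (by simpa using Nat.succ_lt_succ hj) (Nat.succ_lt_succ hjk)
        simpa using this
      · intro j hj hkj
        have := h2 (j + 1) (by simpa using Nat.succ_lt_succ hj) (Nat.succ_le_succ hkj)
        simpa using this

lemma stepB_eq_bestOf {ws : List Int} (hws : ws.Pairwise (· < ·)) {h bound : Int}
    (hh : 1 ≤ h) (b : Int × Int × Int) :
    (if PySem.List.bisectRight ws (PySem.Int.floordiv (bound - 1) h) ≠ 0 ∧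
        h * ws.getD (PySem.List.bisectRight ws (PySem.Int.floordiv (bound - 1) h) - 1) 0 > b.2.2 then
        (h, ws.getD (PySem.List.bisectRight ws (PySem.Int.floordiv (bound - 1) h) - 1) 0,
         h * ws.getD (PySem.List.bisectRight ws (PySem.Int.floordiv (bound - 1) h) - 1) 0)
      else b) = bestOf ws bound h b := by
  have hpos : (0 : Int) < h := by omega
  set q := PySem.Int.floordiv (bound - 1) h with hq
  have hqe : q = (bound - 1) / h := PySem.Int.floordiv_eq_ediv_of_pos hpos
  have hflt : ws.filter (fun w => decide (h * w < bound)) = ws.filter (fun w => decide (w ≤ q)) := by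
    apply List.filter_congr
    intro w _
    have hiff : h * w < bound ↔ w ≤ q := by
      rw [hqe, Int.le_ediv_iff_mul_le hpos, mul_comm]
      omega
    simp only [hiff]
  obtain ⟨hile, hlo, hhi⟩ :=
    PySem.List.bisectRight_spec ws q (hws.imp (fun hab => le_of_lt hab))
  set i := PySem.List.bisectRight ws q with hi
  have htake : ws.filter (fun w => decide (w ≤ q)) = ws.take i :=
    filter_eq_take ws i hile hlo hhi
  unfold bestOf
  rw [hflt, htake]
  rcases Nat.eq_zero_or_pos i with hiz | hipos
  · rw [hiz]
    simp
  · have hklen : i - 1 < ws.length := by omega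
    have hlast : (ws.take i).getLast? = some ws[i - 1] := by
      rw [List.getLast?_eq_getElem?, List.length_take]
      have hmin : min i ws.length = i := by omega
      rw [hmin, List.getElem?_take]
      rw [if_pos (by omega)]
      exact List.getElem?_eq_getElem hklen
    rw [hlast]
    have hgd : ws.getD (i - 1) 0 = ws[i - 1] := List.getD_eq_getElem ws 0 hklen
    rw [hgd]
    by_cases hP : h * ws[i - 1] > b.2.2
    · rw [if_pos ⟨(by omega), hP⟩]
      simp [hP]
    · rw [if_neg (fun hc => hP hc.2)]
      simp [hP]

-- ===== VERDICT (by name: the statement is the Claim_ definition above) =====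
theorem get_bounded_outp_py_spec : Claim_equal_get_bounded_outp_py := by
  unfold Claim_equal_get_bounded_outp_py
  intro outp_mb bound_size _ _
  unfold Spec_get_bounded_outp_py
  simp only [get_bounded_outp_py, get_bounded_outp_py_alt, foldl_eq_LA, fastDivisors_eq]
  have hws := pairwise_LA (PySem.List.pyGetD outp_mb 3 0)
  have hhs : ∀ h ∈ LA (PySem.List.pyGetD outp_mb 2 0), 1 ≤ h := fun h hm => (mem_LA.mp hm).1
  rw [outerA_spec hws hhs (1, 1, 1)]
  have hfold : (LA (PySem.List.pyGetD outp_mb 2 0)).foldl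
      (fun (b : Int × Int × Int) h =>
        if PySem.List.bisectRight (LA (PySem.List.pyGetD outp_mb 3 0))
              (PySem.Int.floordiv (bound_size - 1) h) ≠ 0 ∧
            h * (LA (PySem.List.pyGetD outp_mb 3 0)).getD
              (PySem.List.bisectRight (LA (PySem.List.pyGetD outp_mb 3 0))
                (PySem.Int.floordiv (bound_size - 1) h) - 1) 0 > b.2.2 then
          (h, (LA (PySem.List.pyGetD outp_mb 3 0)).getD
              (PySem.List.bisectRight (LA (PySem.List.pyGetD outp_mb 3 0))
                (PySem.Int.floordiv (bound_size - 1) h) - 1) 0,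
           h * (LA (PySem.List.pyGetD outp_mb 3 0)).getD
              (PySem.List.bisectRight (LA (PySem.List.pyGetD outp_mb 3 0))
                (PySem.Int.floordiv (bound_size - 1) h) - 1) 0)
        else b) (1, 1, 1)
      = (LA (PySem.List.pyGetD outp_mb 2 0)).foldl
        (fun r h => bestOf (LA (PySem.List.pyGetD outp_mb 3 0)) bound_size h r) (1, 1, 1) := by
    apply PySem.List.foldl_congr_mem
    intro b h hm
    exact stepB_eq_bestOf hws (hhs h hm) b
  cases hf : (LA (PySem.List.pyGetD outp_mb 2 0)).find?
      (fun h => PySem.Int.mod bound_size h == 0 &&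
        (LA (PySem.List.pyGetD outp_mb 3 0)).contains (PySem.Int.floordiv bound_size h)) with
  | some h => simp
  | none =>
    simp only
    rw [hfold]
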